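-- pv_equiv track=rewrite | github.com/notmandarin/algorithm | 프로그래머스/1/42840. 모의고사/모의고사.py | solution
-- ===== SOURCE A (Python) =====
-- def solution(answers):
--     l = len(answers)
--     pat_1 = [1,2,3,4,5]*l
--     pat_2 = [2,1,2,3,2,4,2,5]*l
--     pat_3 = [3,3,1,1,2,2,4,4,5,5]*l
--
--     sum1 = 0
--     sum2 = 0
--     sum3 = 0
--
--     for a, p in zip(answers,pat_1) :
--         if a == p :
--             sum1 += 1
--
--     for a, p in zip(answers,pat_2) :
--         if a == p :
--             sum2 += 1
--
--     for a, p in zip(answers,pat_3) :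
--         if a == p :
--             sum3 += 1
--
--     top = max([sum1, sum2, sum3])
--
--     answer = []
--
--     if top == sum1 :
--         answer.append(1)
--     if top == sum2 :
--         answer.append(2)
--     if top == sum3 :
--         answer.append(3)
--
--     return answer
-- ===== SOURCE B (Python) =====
-- def solution(answers):
--     # Histogram approach: one pass builds a frequency table keyed by
--     # (position mod 40, answer value)  (40 = lcm(5, 8, 10), so each pattern is
--     # constant on every residue class mod 40); each score is then a fixed
--     # 40-term table lookup sum, with no per-pattern comparison pass.
--     cnt = {}
--     for i, a in enumerate(answers):
--         k = (i % 40, a)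
--         cnt[k] = cnt.get(k, 0) + 1
--     pats = [(1, [1, 2, 3, 4, 5]),
--             (2, [2, 1, 2, 3, 2, 4, 2, 5]),
--             (3, [3, 3, 1, 1, 2, 2, 4, 4, 5, 5])]
--     scores = [(num, sum(cnt.get((r, p[r % len(p)]), 0) for r in range(40)))
--               for num, p in pats]
--     top = max(s for _, s in scores)
--     return [num for num, s in scores if s == top]
-- ===== Notes on version B (the rewrite author's own statement) =====
-- stated objective: alternative
-- what changed: Replaces A's three zip passes over materialized 5n/8n/10n pattern lists with a histogram: one pass builds a dict counting (index mod 40, value) pairs (40 = lcm(5,8,10)), and each pattern's score is a fixed 40-term sum of table lookups, so no per-pattern comparison pass over the input remains.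
import Mathlib
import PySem

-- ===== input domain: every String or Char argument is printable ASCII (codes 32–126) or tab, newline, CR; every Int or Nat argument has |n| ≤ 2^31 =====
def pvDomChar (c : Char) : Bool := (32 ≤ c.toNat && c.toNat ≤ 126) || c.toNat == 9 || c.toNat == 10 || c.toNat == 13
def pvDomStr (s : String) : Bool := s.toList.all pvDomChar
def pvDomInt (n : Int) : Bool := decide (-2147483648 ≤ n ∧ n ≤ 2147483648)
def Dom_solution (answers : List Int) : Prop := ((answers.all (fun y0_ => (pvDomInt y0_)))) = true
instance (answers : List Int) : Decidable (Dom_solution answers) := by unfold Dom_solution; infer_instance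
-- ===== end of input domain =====

-- B replaces A's three zip passes over materialized repeated-pattern lists by a histogram of
-- (index mod 40, value) pairs built in one pass, each score then being a fixed 40-term lookup sum
-- (objective: alternative, same asymptotic cost).


-- ===== PORT A =====
def solution (answers : List Int) : List Int :=
  let l := answers.length
  let pat1 : List Int := (List.replicate l [1,2,3,4,5]).flatten
  let pat2 : List Int := (List.replicate l [2,1,2,3,2,4,2,5]).flatten
  let pat3 : List Int := (List.replicate l [3,3,1,1,2,2,4,4,5,5]).flatten
  let sum1 := (answers.zip pat1).foldl (fun s ap => if ap.1 = ap.2 then s + 1 else s) (0 : Int)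
  let sum2 := (answers.zip pat2).foldl (fun s ap => if ap.1 = ap.2 then s + 1 else s) (0 : Int)
  let sum3 := (answers.zip pat3).foldl (fun s ap => if ap.1 = ap.2 then s + 1 else s) (0 : Int)
  -- max([sum1, sum2, sum3]): the list literal is nonempty, so max? is always some
  let top := (PySem.List.max? [sum1, sum2, sum3] (fun x => x)).getD 0
  let answer : List Int := []
  let answer := if top = sum1 then answer ++ [1] else answer
  let answer := if top = sum2 then answer ++ [2] else answer
  let answer := if top = sum3 then answer ++ [3] else answer
  answer

-- ===== PORT B =====
def solution_alt (answers : List Int) : List Int :=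
  let cnt := (PySem.List.enumerate answers 0).foldl
    (fun (d : PySem.Dict (Int × Int) Int) ia =>
      let k : Int × Int := (PySem.Int.mod ia.1 40, ia.2)
      d.insert k (d.getD k 0 + 1)) PySem.Dict.empty
  let pats : List (Int × List Int) :=
    [(1, [1,2,3,4,5]), (2, [2,1,2,3,2,4,2,5]), (3, [3,3,1,1,2,2,4,4,5,5])]
  let scores : List (Int × Int) := pats.map (fun np =>
    (np.1, ((PySem.List.pyRange 0 40).map (fun r =>
      cnt.getD (r, PySem.List.pyGetD np.2 (PySem.Int.mod r (np.2.length : Int)) 0) 0)).sum))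
  let top := (PySem.List.max? (scores.map (fun ns => ns.2)) (fun x => x)).getD 0
  (scores.filter (fun ns => ns.2 == top)).map (fun ns => ns.1)

-- ===== PRECONDITION & SPEC =====
def Spec_solution (answers : List Int) (out : List Int) : Prop := out = solution_alt answers
instance (answers : List Int) (out : List Int) : Decidable (Spec_solution answers out) := by unfold Spec_solution; infer_instance

-- ===== CLAIM (what is proved, stated in full; the proofs are below) =====
def Claim_equal_solution : Prop := ∀ (answers : List Int), Dom_solution answers → Spec_solution answers (solution answers)

-- ===== LEMMAS AND PROOFS =====

-- B's histogram, as a standalone term for the proofs (definitionally the fold in solution_alt)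
def histo (answers : List Int) : PySem.Dict (Int × Int) Int :=
  (PySem.List.enumerate answers 0).foldl
    (fun (d : PySem.Dict (Int × Int) Int) ia =>
      d.insert (PySem.Int.mod ia.1 40, ia.2)
        (d.getD (PySem.Int.mod ia.1 40, ia.2) 0 + 1)) PySem.Dict.empty

-- indexing into the flattened repetition of a pattern is modular indexing into the pattern
theorem flatrep_getD (pat : List Int) (d : Int) :
    ∀ (n k : Nat), k < n * pat.length →
      ((List.replicate n pat).flatten).getD k d = pat.getD (k % pat.length) d := by
  intro n
  induction n with
  | zero => intro k hk; omega
  | succ n ih =>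
      intro k hk
      rw [List.replicate_succ, List.flatten_cons]
      by_cases hkm : k < pat.length
      · rw [List.getD_append _ _ _ _ hkm, Nat.mod_eq_of_lt hkm]
      · have hle : pat.length ≤ k := by omega
        have hmul : (n + 1) * pat.length = n * pat.length + pat.length := by ring
        rw [List.getD_append_right _ _ _ _ hle, ih (k - pat.length) (by omega),
          Nat.mod_eq_sub_mod hle]

-- A's zip against the flattened repetition counts the indices whose answer matches pat[i % m]
theorem A_count (pat : List Int) (hm : 0 < pat.length) (xs : List Int) :
    (xs.zip ((List.replicate xs.length pat).flatten)).foldl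
      (fun s ap => if ap.1 = ap.2 then s + 1 else s) (0 : Int)
    = ((PySem.List.enumerate xs 0).countP
        (fun ia => decide (ia.2 = pat.getD (ia.1.toNat % pat.length) 0)) : Int) := by
  have hzip : xs.zip ((List.replicate xs.length pat).flatten)
      = (PySem.List.enumerate xs 0).map
          (fun ia => (ia.2, pat.getD (ia.1.toNat % pat.length) 0)) := by
    have hflatlen : ((List.replicate xs.length pat).flatten).length
        = xs.length * pat.length := by
      simp [List.length_flatten, Nat.mul_comm]
    apply List.ext_getElem
    · simp [List.length_zip, hflatlen, PySem.List.length_enumerate]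
      exact Nat.le_mul_of_pos_right _ hm
    · intro i h1 h2
      have hi : i < xs.length := by
        simp [List.length_zip, hflatlen] at h1; omega
      have hif : i < ((List.replicate xs.length pat).flatten).length := by
        rw [hflatlen]; calc i < xs.length := hi
          _ ≤ xs.length * pat.length := Nat.le_mul_of_pos_right _ hm
      rw [List.getElem_zip, List.getElem_map, PySem.List.getElem_enumerate]
      simp only [zero_add, Int.toNat_natCast]
      refine Prod.ext rfl ?_
      have := flatrep_getD pat 0 xs.length i (by rw [← hflatlen]; exact hif)
      rw [← List.getD_eq_getElem _ 0 hif, this]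
  have hfa : (fun (s : Int) (ap : Int × Int) => if ap.1 = ap.2 then s + 1 else s)
      = (fun s ap => if (fun (ap : Int × Int) => decide (ap.1 = ap.2)) ap = true then s + 1 else s) := by
    funext s ap; by_cases h : ap.1 = ap.2 <;> simp [h]
  rw [hzip, hfa, PySem.List.foldl_count_if, List.countP_map]
  simp [Function.comp_def]

-- in a range sum of pair-match indicators, only the residue k can contribute
theorem sum_ite_range (x : Int) (f : Nat → Int) (k : Nat) :
    ∀ (N : Nat), k < N →
      ((List.range N).map (fun (r : Nat) => if ((r : Int), f r) = ((k : Int), x) then 1 else 0)).sum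
        = (if x = f k then 1 else (0 : Nat)) := by
  intro N
  induction N with
  | zero => intro h; omega
  | succ N ih =>
      intro h
      rw [List.range_succ, List.map_append, List.sum_append]
      simp only [List.map_cons, List.map_nil, List.sum_cons, List.sum_nil]
      by_cases hk : k < N
      · have hne : ¬ (((N : Int), f N) = ((k : Int), x)) := by
          intro he; rw [Prod.mk.injEq] at he
          have : N = k := by exact_mod_cast he.1
          omega
        rw [ih hk, if_neg hne]
        simp
      · have hkN : k = N := by omega
        subst hkN
        have hz : ((List.range k).map
            (fun (r : Nat) => if ((r : Int), f r) = ((k : Int), x) then 1 else 0)).sum = 0 := by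
          apply List.sum_eq_zero
          intro y hy
          rcases List.mem_map.1 hy with ⟨r, hr, rfl⟩
          have hrk : r ≠ k := by have := List.mem_range.1 hr; omega
          have hne : ¬ (((r : Int), f r) = ((k : Int), x)) := by
            intro he; rw [Prod.mk.injEq] at he
            have : r = k := by exact_mod_cast he.1
            omega
          simp [hne]
        rw [hz]
        rcases eq_or_ne (f k) x with hx | hx
        · simp [hx]
        · have h1 : ¬ (((k : Int), f k) = ((k : Int), x)) := by
            simp [Prod.mk.injEq, hx]
          have h2 : ¬ (x = f k) := fun he => hx he.symm
          simp [h1, h2]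

-- summing histogram counts of (r, f r) over all residues r < N counts the matching pairs
theorem sum_count_eq_countP (f : Nat → Int) (N : Nat) :
    ∀ (M : List (Int × Int)), (∀ p ∈ M, ∃ k, k < N ∧ p.1 = (k : Int)) →
      ((List.range N).map (fun (r : Nat) => M.count ((r : Int), f r))).sum
        = M.countP (fun p => decide (p.2 = f p.1.toNat)) := by
  intro M
  induction M with
  | nil => intro _; simp
  | cons p M ih =>
      intro h
      obtain ⟨k, hkN, hk1⟩ := h p List.mem_cons_self
      have hM : ∀ q ∈ M, ∃ k, k < N ∧ q.1 = (k : Int) :=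
        fun q hq => h q (List.mem_cons_of_mem _ hq)
      have hmap : (List.range N).map (fun (r : Nat) => (p :: M).count ((r : Int), f r))
          = (List.range N).map
              (fun (r : Nat) => M.count ((r : Int), f r) + (if ((r : Int), f r) = p then 1 else 0)) := by
        apply List.map_congr_left
        intro r _
        rw [List.count_cons]
        congr 1
        by_cases he : p = ((r : Int), f r)
        · simp [he]
        · have he2 : ¬ (((r : Int), f r) = p) := fun h2 => he h2.symm
          simp [he, he2]
      rw [hmap, List.sum_map_add, ih hM, List.countP_cons]
      congr 1
      obtain ⟨p1, p2⟩ := p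
      simp only at hk1
      subst hk1
      rw [sum_ite_range p2 f k N hkN]
      simp [Int.toNat_natCast, eq_comm]

-- B's 40-term histogram-lookup sum equals A's zip-fold score, for each pattern dividing 40
theorem score_eq (xs pat : List Int) (hm : 0 < pat.length) (hdvd : pat.length ∣ 40) :
    ((PySem.List.pyRange 0 40).map (fun r =>
        (histo xs).getD (r, PySem.List.pyGetD pat (PySem.Int.mod r (pat.length : Int)) 0) 0)).sum
    = (xs.zip ((List.replicate xs.length pat).flatten)).foldl
        (fun s ap => if ap.1 = ap.2 then s + 1 else s) (0 : Int) := by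
  rw [A_count pat hm xs]
  -- histogram lookups are counts in the mapped enumerate list
  have hhisto : ∀ v, (histo xs).getD v 0
      = ((((PySem.List.enumerate xs 0).map
            (fun ia => ((PySem.Int.mod ia.1 40, ia.2) : Int × Int))).count v : Nat) : Int) := by
    intro v
    unfold histo
    show (List.foldl (fun (d : PySem.Dict (Int × Int) Int) ia =>
        (fun (d : PySem.Dict (Int × Int) Int) x => d.insert x (d.getD x 0 + 1)) d
          ((fun (ia : Int × Int) => ((PySem.Int.mod ia.1 40, ia.2) : Int × Int)) ia))
        PySem.Dict.empty (PySem.List.enumerate xs 0)).getD v 0 = _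
    rw [← List.foldl_map (f := fun (ia : Int × Int) => ((PySem.Int.mod ia.1 40, ia.2) : Int × Int))
        (g := fun (d : PySem.Dict (Int × Int) Int) x => d.insert x (d.getD x 0 + 1))
        (l := PySem.List.enumerate xs 0) (init := PySem.Dict.empty),
      PySem.Dict.getD_foldl_insert_add_one]
    simp
  have h40 : (40 : Int) = ((40 : Nat) : Int) := by norm_num
  rw [h40, PySem.List.pyRange_zero_natCast, List.map_map]
  -- evaluate each range term at a Nat residue
  have hterm : ∀ r : Nat,
      ((fun r => (histo xs).getD (r, PySem.List.pyGetD pat (PySem.Int.mod r (pat.length : Int)) 0) 0)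
        ∘ (fun k : Nat => (k : Int))) r
      = ((((PySem.List.enumerate xs 0).map
            (fun ia => ((PySem.Int.mod ia.1 40, ia.2) : Int × Int))).count
          ((r : Int), pat.getD (r % pat.length) 0) : Nat) : Int) := by
    intro r
    simp only [Function.comp]
    rw [PySem.Int.mod_natCast, PySem.List.pyGetD_natCast, hhisto]
  rw [List.map_congr_left (fun r _ => hterm r)]
  have hcast : ((List.range 40).map (fun (r : Nat) =>
        ((((PySem.List.enumerate xs 0).map
            (fun ia => ((PySem.Int.mod ia.1 40, ia.2) : Int × Int))).count
          ((r : Int), pat.getD (r % pat.length) 0) : Nat) : Int))).sum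
      = ((((List.range 40).map (fun (r : Nat) =>
          (((PySem.List.enumerate xs 0).map
            (fun ia => ((PySem.Int.mod ia.1 40, ia.2) : Int × Int))).count
          ((r : Int), pat.getD (r % pat.length) 0)))).sum : Nat) : Int) := by
    rw [Nat.cast_list_sum, List.map_map]
    rfl
  rw [hcast]
  rw [sum_count_eq_countP (fun k => pat.getD (k % pat.length) 0) 40
      ((PySem.List.enumerate xs 0).map (fun ia => ((PySem.Int.mod ia.1 40, ia.2) : Int × Int)))
      (by
        intro p hp
        rcases List.mem_map.1 hp with ⟨ia, hia, rfl⟩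
        rcases (PySem.List.mem_enumerate_iff _ _ _).1 hia with ⟨k, hk, rfl⟩
        refine ⟨k % 40, Nat.mod_lt _ (by norm_num), ?_⟩
        simp)]
  rw [List.countP_map]
  congr 1
  apply List.countP_congr
  intro ia hia
  rcases (PySem.List.mem_enumerate_iff _ _ _).1 hia with ⟨k, hk, rfl⟩
  have h1 : (PySem.Int.mod ((k : Nat) : Int) 40).toNat % pat.length = k % pat.length := by
    rw [show (40 : Int) = ((40 : Nat) : Int) from by norm_num, PySem.Int.mod_natCast,
      Int.toNat_natCast, Nat.mod_mod_of_dvd k hdvd]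
  simp only [Function.comp, zero_add, Int.toNat_natCast, h1]

-- the if-append chain and the filter-map over the literal score table agree
theorem out_eq (t c1 c2 c3 : Int) :
    (let a : List Int := []
     let a := if t = c1 then a ++ [1] else a
     let a := if t = c2 then a ++ [2] else a
     let a := if t = c3 then a ++ [3] else a
     a)
    = (([(1, c1), (2, c2), (3, c3)] : List (Int × Int)).filter
        (fun ns => ns.2 == t)).map (fun ns => ns.1) := by
  by_cases h1 : c1 = t <;> by_cases h2 : c2 = t <;> by_cases h3 : c3 = t <;>
    simp [h1, h2, h3,
      (show (t = c1) = (c1 = t) from propext eq_comm),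
      (show (t = c2) = (c2 = t) from propext eq_comm),
      (show (t = c3) = (c3 = t) from propext eq_comm)]

-- ===== VERDICT (by name: the statement is the Claim_ definition above) =====
set_option maxHeartbeats 1000000 in
theorem solution_spec : Claim_equal_solution := by
  intro answers _
  unfold Spec_solution
  simp only [solution, solution_alt, List.map_cons, List.map_nil]
  rw [show ((PySem.List.enumerate answers 0).foldl
      (fun (d : PySem.Dict (Int × Int) Int) ia =>
        d.insert (PySem.Int.mod ia.1 40, ia.2)
          (d.getD (PySem.Int.mod ia.1 40, ia.2) 0 + 1)) PySem.Dict.empty) = histo answers from rfl]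
  rw [score_eq answers [1,2,3,4,5] (by norm_num) (by norm_num),
      score_eq answers [2,1,2,3,2,4,2,5] (by norm_num) (by norm_num),
      score_eq answers [3,3,1,1,2,2,4,4,5,5] (by norm_num) (by norm_num)]
  exact out_eq _ _ _ _
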